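-- pv_equiv track=rewrite | github.com/Krzysiek-Mistrz/data_structures | src/suffix_tree.py | binary_search_pattern
-- ===== SOURCE A (Python) =====
-- def binary_search_pattern(text, pattern, suffix_array):
--     left, right = 0, len(suffix_array) - 1
--     while left <= right:
--         mid = (left + right) // 2
--         start = suffix_array[mid]
--         substring = text[start:start+len(pattern)]
--         if pattern == substring:
--             return True
--         elif pattern < substring:
--             right = mid - 1
--         else:
--             left = mid + 1
--     return False
-- ===== SOURCE B (Python) =====
-- def binary_search_pattern(text, pattern, suffix_array):
--     m = len(pattern)
--     return any(text[s:s+m] == pattern for s in suffix_array)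
-- ===== Notes on version B (the rewrite author's own statement) =====
-- stated objective: simpler
-- what changed: Replaces the hand-coded left/right/mid binary-search loop over the suffix array with a single linear membership scan that tests whether the pattern equals the length-m prefix of any listed suffix.
-- outside the precondition, e.g. on binary_search_pattern('ab', 'a', [1, 0]): A returns False, B returns True
import Mathlib
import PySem

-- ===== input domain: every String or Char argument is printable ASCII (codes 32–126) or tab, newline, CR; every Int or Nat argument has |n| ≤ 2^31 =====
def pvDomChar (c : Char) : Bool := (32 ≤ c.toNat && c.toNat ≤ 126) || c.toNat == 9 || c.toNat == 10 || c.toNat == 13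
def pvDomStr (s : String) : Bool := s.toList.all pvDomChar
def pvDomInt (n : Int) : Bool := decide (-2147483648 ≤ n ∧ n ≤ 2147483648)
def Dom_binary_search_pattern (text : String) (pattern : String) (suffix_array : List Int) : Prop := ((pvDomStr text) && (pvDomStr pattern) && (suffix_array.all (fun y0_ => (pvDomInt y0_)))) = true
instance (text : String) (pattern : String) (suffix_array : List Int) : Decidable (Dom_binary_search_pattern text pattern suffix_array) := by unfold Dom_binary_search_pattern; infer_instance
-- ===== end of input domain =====

-- B replaces A's hand-coded binary search over the suffix array by a single linear
-- membership scan over the length-|pattern| prefixes of the listed suffixes (simpler, not faster).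


-- ===== PORT A =====
-- the while-loop of A, recursing on the shrinking interval [left, right]
def bspLoop (text : String) (pattern : String) (suffix_array : List Int)
    (left right : Int) : Bool :=
  if h : left ≤ right then
    let mid := PySem.Int.floordiv (left + right) 2
    let start := PySem.List.pyGetD suffix_array mid 0
    let substring := PySem.Str.slice text (some start) (some (start + PySem.Str.len pattern))
    if pattern = substring then true
    else if pattern < substring then bspLoop text pattern suffix_array left (mid - 1)
    else bspLoop text pattern suffix_array (mid + 1) right
  else false
termination_by (right + 1 - left).toNat
decreasing_by
  · have h1 : left * 2 ≤ left + right := by omega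
    have h2 : left + right < (right + 1) * 2 := by omega
    have _hlo := (PySem.Int.le_floordiv_iff_mul_le (a := left + right) (b := 2) (q := left) (by omega)).2 h1
    have _hhi := (PySem.Int.floordiv_lt_iff_lt_mul (a := left + right) (b := 2) (q := right + 1) (by omega)).2 h2
    omega
  · have h2 : left + right < (right + 1) * 2 := by omega
    have _hlo := (PySem.Int.le_floordiv_iff_mul_le (a := left + right) (b := 2) (q := left) (by omega)).2 (by omega)
    have _hhi := (PySem.Int.floordiv_lt_iff_lt_mul (a := left + right) (b := 2) (q := right + 1) (by omega)).2 h2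
    omega

def binary_search_pattern (text : String) (pattern : String) (suffix_array : List Int) : Bool :=
  bspLoop text pattern suffix_array 0 ((suffix_array.length : Int) - 1)

-- ===== PORT B =====
def binary_search_pattern_alt (text : String) (pattern : String) (suffix_array : List Int) : Bool :=
  suffix_array.any (fun s =>
    decide (PySem.Str.slice text (some s) (some (s + PySem.Str.len pattern)) = pattern))

-- ===== PRECONDITION & SPEC =====
-- the table of length-|pattern| prefixes of the listed suffixes, as code-point lists
def pvSubs (text : String) (pattern : String) (suffix_array : List Int) : List (List Char) :=
  suffix_array.map (fun s => (PySem.Str.slice text (some s) (some (s + PySem.Str.len pattern))).toList)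

-- Pre_ excludes inputs whose prefix table pvSubs is not non-decreasing — i.e. suffix_array is not
-- sorted as a suffix array must be; there A's binary-search verdict depends on the accidental probe
-- path while B reports true membership, and neither value is specified for a malformed suffix array.
def Pre_binary_search_pattern (text : String) (pattern : String) (suffix_array : List Int) : Prop :=
  (pvSubs text pattern suffix_array).Pairwise (· ≤ ·)
instance (text : String) (pattern : String) (suffix_array : List Int) : Decidable (Pre_binary_search_pattern text pattern suffix_array) := by unfold Pre_binary_search_pattern; infer_instance

def pvWitness_binary_search_pattern : String × String × List Int := ("banana", "an", [5, 3, 1, 0, 4, 2])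

def Spec_binary_search_pattern (text : String) (pattern : String) (suffix_array : List Int) (out : Bool) : Prop := out = binary_search_pattern_alt text pattern suffix_array
instance (text : String) (pattern : String) (suffix_array : List Int) (out : Bool) : Decidable (Spec_binary_search_pattern text pattern suffix_array out) := by unfold Spec_binary_search_pattern; infer_instance

-- ===== CLAIM (what is proved, stated in full; the proofs are below) =====
def Claim_equal_binary_search_pattern : Prop := ∀ (text : String) (pattern : String) (suffix_array : List Int), Dom_binary_search_pattern text pattern suffix_array → Pre_binary_search_pattern text pattern suffix_array → Spec_binary_search_pattern text pattern suffix_array (binary_search_pattern text pattern suffix_array)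

-- ===== LEMMAS AND PROOFS =====

-- B is the membership test on the prefix table
lemma alt_eq_any (text pattern : String) (sa : List Int) :
    binary_search_pattern_alt text pattern sa
      = (pvSubs text pattern sa).any (fun x => decide (x = pattern.toList)) := by
  simp only [binary_search_pattern_alt, pvSubs, List.any_map, Function.comp_def]
  exact congrArg sa.any (funext fun s => decide_eq_decide.mpr String.toList_inj.symm)

-- monotonicity of the sorted prefix table along indices
lemma subs_mono (text pattern : String) (sa : List Int)
    (hs : (pvSubs text pattern sa).Pairwise (· ≤ ·))
    (i j : Nat) (hij : i ≤ j) (hj : j < sa.length) :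
    (pvSubs text pattern sa)[i]'(by simpa [pvSubs] using lt_of_le_of_lt hij hj)
      ≤ (pvSubs text pattern sa)[j]'(by simpa [pvSubs] using hj) := by
  rcases eq_or_lt_of_le hij with rfl | hlt
  · exact le_rfl
  · exact (List.pairwise_iff_getElem.mp hs) i j _ _ hlt

-- main loop invariant: if every element outside [left, right] differs from the pattern,
-- the loop decides membership of the pattern in the whole prefix table
lemma bspLoop_eq_any (text pattern : String) (sa : List Int)
    (hs : (pvSubs text pattern sa).Pairwise (· ≤ ·)) :
    ∀ (n : Nat) (left right : Int), (right + 1 - left).toNat ≤ n → 0 ≤ left → right < (sa.length : Int) →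
    (∀ j : Nat, (hj : j < sa.length) → ((j : Int) < left ∨ right < (j : Int)) →
        (pvSubs text pattern sa)[j]'(by simpa [pvSubs] using hj) ≠ pattern.toList) →
    bspLoop text pattern sa left right
      = (pvSubs text pattern sa).any (fun x => decide (x = pattern.toList)) := by
  intro n
  induction n with
  | zero =>
    intro left right hfuel hl hr hout
    rw [bspLoop]
    rw [dif_neg (by omega)]
    symm
    rw [List.any_eq_false]
    intro x hx
    simp only [decide_eq_true_eq]
    obtain ⟨j, hj, rfl⟩ := List.mem_iff_getElem.mp hx
    exact hout j (by simpa [pvSubs] using hj) (by omega)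
  | succ n ih =>
    intro left right hfuel hl hr hout
    rw [bspLoop]
    by_cases hlr : left ≤ right
    · rw [dif_pos hlr]
      have h1 : left * 2 ≤ left + right := by omega
      have h2 : left + right < (right + 1) * 2 := by omega
      have hlm := (PySem.Int.le_floordiv_iff_mul_le (a := left + right) (b := 2) (q := left) (by omega)).2 h1
      have hmr := (PySem.Int.floordiv_lt_iff_lt_mul (a := left + right) (b := 2) (q := right + 1) (by omega)).2 h2
      set m : Int := PySem.Int.floordiv (left + right) 2 with hm
      have hmn : m.toNat < sa.length := by omega
      have hcast : (m.toNat : Int) = m := by omega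
      have hstart : PySem.List.pyGetD sa m 0 = sa[m.toNat] := by
        have h := PySem.List.pyGetD_natCast (xs := sa) (d := (0 : Int)) (n := m.toNat)
        rw [hcast] at h
        rw [h]
        exact List.getD_eq_getElem sa 0 hmn
      set sub : String := PySem.Str.slice text (some (PySem.List.pyGetD sa m 0))
            (some (PySem.List.pyGetD sa m 0 + PySem.Str.len pattern)) with hsubdef
      have hsub : sub.toList = (pvSubs text pattern sa)[m.toNat]'(by simpa [pvSubs] using hmn) := by
        rw [hsubdef, hstart]; simp [pvSubs]
      by_cases heq : pattern = sub
      · rw [if_pos heq]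
        symm
        rw [List.any_eq_true]
        exact ⟨(pvSubs text pattern sa)[m.toNat]'(by simpa [pvSubs] using hmn),
          List.getElem_mem _, decide_eq_true (by rw [← hsub, heq])⟩
      · rw [if_neg heq]
        by_cases hlt : pattern < sub
        · rw [if_pos hlt]
          have hlt' : pattern.toList < (pvSubs text pattern sa)[m.toNat]'(by simpa [pvSubs] using hmn) := by
            rw [← hsub]; exact String.lt_iff_toList_lt.mp hlt
          refine ih left (m - 1) (by omega) hl (by omega) ?_
          intro j hj hside
          rcases hside with hsl | hsr
          · exact hout j hj (Or.inl hsl)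
          · have hmj : m.toNat ≤ j := by omega
            have := subs_mono text pattern sa hs m.toNat j hmj hj
            intro hp
            rw [hp] at this
            exact absurd hlt' (not_lt.mpr this)
        · rw [if_neg hlt]
          have hgt : (pvSubs text pattern sa)[m.toNat]'(by simpa [pvSubs] using hmn) < pattern.toList := by
            rw [← hsub]
            exact lt_of_le_of_ne (String.le_iff_toList_le.mp (not_lt.mp hlt))
              (fun h => heq (String.toList_inj.mp h.symm))
          refine ih (m + 1) right (by omega) (by omega) hr ?_
          intro j hj hside
          rcases hside with hsl | hsr
          · have hjm : j ≤ m.toNat := by omega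
            have := subs_mono text pattern sa hs j m.toNat hjm hmn
            intro hp
            rw [hp] at this
            exact absurd hgt (not_lt.mpr this)
          · exact hout j hj (Or.inr hsr)
    · rw [dif_neg hlr]
      symm
      rw [List.any_eq_false]
      intro x hx
      simp only [decide_eq_true_eq]
      obtain ⟨j, hj, rfl⟩ := List.mem_iff_getElem.mp hx
      exact hout j (by simpa [pvSubs] using hj) (by omega)

-- ===== VERDICT (by name: the statement is the Claim_ definition above) =====
theorem binary_search_pattern_spec : Claim_equal_binary_search_pattern := by
  intro text pattern sa _ hpre
  unfold Spec_binary_search_pattern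
  rw [alt_eq_any, binary_search_pattern]
  rw [bspLoop_eq_any text pattern sa hpre ((sa.length : Int)).toNat 0 ((sa.length : Int) - 1)
    (by omega) le_rfl (by omega) (fun j hj hout => by omega)]
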